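-- pv_equiv track=rewrite | github.com/callmeonlyashu/AM-Data-Structures-and-Algorithms | problem_solving/advent_of_code_2024/day_4_copied.py | get_row_wise_count
-- ===== SOURCE A (Python) =====
-- def get_row_wise_count(arr, words, word_length):
--     count = 0
--     for row in arr:
--         for i in range(len(row) - word_length + 1):
--             string = "".join(row[i:i + word_length])
--             if string in words:
--                 count += 1
--     return count
-- ===== SOURCE B (Python) =====
-- def get_row_wise_count(arr, words, word_length):
--     windows = ["".join(row[i:i + word_length])
--                for row in arr
--                for i in range(len(row) - word_length + 1)]
--     counts = {}
--     for s in windows: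
--         counts[s] = counts.get(s, 0) + 1
--     return sum(counts.get(w, 0) for w in set(words))
-- ===== Notes on version B (the rewrite author's own statement) =====
-- stated objective: alternative
-- what changed: B replaces A's nested count-as-you-scan loops (testing every window against the words list) with a staged pipeline: materialise the flat list of all window strings, build one global frequency table over it, and sum the multiplicities of the distinct words against that index.
import Mathlib
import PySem

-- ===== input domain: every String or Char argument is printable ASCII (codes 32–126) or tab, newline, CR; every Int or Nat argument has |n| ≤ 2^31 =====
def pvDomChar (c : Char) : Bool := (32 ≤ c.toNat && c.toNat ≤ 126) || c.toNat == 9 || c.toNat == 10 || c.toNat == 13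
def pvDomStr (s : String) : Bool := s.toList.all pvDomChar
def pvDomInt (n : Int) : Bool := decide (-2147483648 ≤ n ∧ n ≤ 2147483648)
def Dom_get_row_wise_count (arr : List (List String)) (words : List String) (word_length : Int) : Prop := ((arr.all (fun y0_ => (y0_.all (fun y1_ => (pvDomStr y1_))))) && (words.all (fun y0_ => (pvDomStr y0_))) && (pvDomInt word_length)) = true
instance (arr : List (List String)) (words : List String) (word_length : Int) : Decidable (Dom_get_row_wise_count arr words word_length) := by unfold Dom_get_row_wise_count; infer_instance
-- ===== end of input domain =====

-- B replaces A's nested count-as-you-scan loops with a staged pipeline: the flat list of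
-- all window strings, one global frequency table, and a sum of multiplicities over the
-- distinct words (alternative decomposition, same result on every input).

-- ===== PORT A =====
def get_row_wise_count (arr : List (List String)) (words : List String) (word_length : Int) : Int :=
  arr.foldl (fun count row =>
    (PySem.List.pyRange 0 ((row.length : Int) - word_length + 1) 1).foldl (fun c i =>
      let string := PySem.Str.join "" (PySem.List.slice row (some i) (some (i + word_length)))
      if words.contains string then c + 1 else c) count) 0

-- ===== PORT B =====
def get_row_wise_count_alt (arr : List (List String)) (words : List String) (word_length : Int) : Int :=
  let windows : List String :=
    arr.flatMap (fun row =>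
      (PySem.List.pyRange 0 ((row.length : Int) - word_length + 1) 1).map (fun i =>
        PySem.Str.join "" (PySem.List.slice row (some i) (some (i + word_length)))))
  let counts : PySem.Dict String Int :=
    windows.foldl (fun d s => d.modify s 0 (· + 1)) PySem.Dict.empty
  ((PySem.Set.ofList words).map (fun w => counts.getD w 0)).sum

-- ===== PRECONDITION & SPEC =====
def Spec_get_row_wise_count (arr : List (List String)) (words : List String) (word_length : Int) (out : Int) : Prop := out = get_row_wise_count_alt arr words word_length
instance (arr : List (List String)) (words : List String) (word_length : Int) (out : Int) : Decidable (Spec_get_row_wise_count arr words word_length out) := by unfold Spec_get_row_wise_count; infer_instance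

-- ===== CLAIM (what is proved, stated in full; the proofs are below) =====
def Claim_equal_get_row_wise_count : Prop := ∀ (arr : List (List String)) (words : List String) (word_length : Int), Dom_get_row_wise_count arr words word_length → Spec_get_row_wise_count arr words word_length (get_row_wise_count arr words word_length)

-- ===== LEMMAS AND PROOFS =====

-- On a duplicate-free list S, summing the indicator of x over S is 1 iff x ∈ S.
theorem pv_sum_indicator (S : List String) (x : String) (hS : S.Nodup) :
    (S.map (fun w => if x = w then (1 : Int) else 0)).sum = if x ∈ S then 1 else 0 := by
  induction S with
  | nil => simp
  | cons y S ih =>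
    rcases List.nodup_cons.mp hS with ⟨hy, hS'⟩
    by_cases hxy : x = y
    · subst hxy; simp [ih hS', hy]
    · simp [hxy, ih hS', List.mem_cons]

-- Summing the multiplicities of the distinct elements of `words` in W counts
-- exactly the elements of W that occur in `words`.
theorem pv_sum_set_count (words W : List String) :
    ((PySem.Set.ofList words).map (fun w => (W.count w : Int))).sum
      = (W.countP (fun x => words.contains x) : Int) := by
  induction W with
  | nil => simp
  | cons x W ih =>
    have hcnt : ∀ w : String, ((x :: W).count w : Int)
        = (W.count w : Int) + (if x = w then (1 : Int) else 0) := by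
      intro w
      by_cases h : x = w
      · subst h; rw [List.count_cons]; simp
      · rw [List.count_cons]; simp [h]
    rw [List.map_congr_left (fun w _ => hcnt w)]
    rw [PySem.List.sum_map_add_int]
    rw [ih, pv_sum_indicator _ _ (PySem.Set.nodup_ofList words), List.countP_cons]
    by_cases hx : x ∈ words
    · simp [PySem.Set.mem_ofList, hx]
    · simp [PySem.Set.mem_ofList, hx]

-- A's nested counting loops, from any accumulator, add the number of windows (over all
-- rows) that occur in `words`: countP over the flat window list.
theorem pv_A_gen (words : List String) (word_length : Int) (arr : List (List String)) (acc : Int) :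
    arr.foldl (fun count row =>
      (PySem.List.pyRange 0 ((row.length : Int) - word_length + 1) 1).foldl (fun c i =>
        let string := PySem.Str.join "" (PySem.List.slice row (some i) (some (i + word_length)))
        if words.contains string then c + 1 else c) count) acc
      = acc + ((arr.flatMap (fun row =>
          (PySem.List.pyRange 0 ((row.length : Int) - word_length + 1) 1).map (fun i =>
            PySem.Str.join "" (PySem.List.slice row (some i) (some (i + word_length)))))).countP
          (fun x => words.contains x) : Int) := by
  induction arr generalizing acc with
  | nil => simp
  | cons row arr ih =>
    rw [List.foldl_cons, PySem.List.foldl_if_add_one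
      (p := fun i => words.contains (PySem.Str.join "" (PySem.List.slice row (some i) (some (i + word_length))))), ih]
    rw [List.flatMap_cons, List.countP_append, List.countP_map]
    simp only [Function.comp_def]
    push_cast
    omega

-- B's frequency table reads back the multiplicity of each word in the window list W.
theorem pv_table (words W : List String) :
    ((PySem.Set.ofList words).map (fun w =>
        (W.foldl (fun d s => d.modify s 0 (· + 1)) PySem.Dict.empty).getD w 0)).sum
      = (W.countP (fun x => words.contains x) : Int) := by
  have h : ∀ w : String,
      (W.foldl (fun d s => d.modify s 0 (· + 1)) PySem.Dict.empty).getD w 0 = (W.count w : Int) := by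
    intro w
    rw [PySem.Dict.getD_foldl_modify_add_one, PySem.Dict.getD_empty]
    simp
  rw [List.map_congr_left (fun w _ => h w), pv_sum_set_count]

-- ===== VERDICT (by name: the statement is the Claim_ definition above) =====
theorem get_row_wise_count_spec : Claim_equal_get_row_wise_count := by
  intro arr words word_length _
  unfold Spec_get_row_wise_count get_row_wise_count get_row_wise_count_alt
  rw [pv_A_gen]
  rw [pv_table words]
  simp
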